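-- pv_equiv track=rewrite | github.com/Timurbtr23/Matfyz | Programovani_1/simmetry_of_matrices.py | symmetry_main_diagonal
-- ===== SOURCE A (Python) =====
-- def symmetry_main_diagonal(_matrix, dimension):
--     symmetry = 0
--     for i in range(0, dimension):
--         for j in range(0, dimension):
--             if (_matrix[i][j] == _matrix[j][i]) and (j != i):
--                 symmetry += 1
--     if symmetry == dimension*(dimension-1):
--         return 1
--     else:
--         return 0
-- ===== SOURCE B (Python) =====
-- def symmetry_main_diagonal(_matrix, dimension):
--     sub = [row[:dimension] for row in _matrix[:dimension]]
--     transpose = [[_matrix[j][i] for j in range(dimension)]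
--                  for i in range(dimension)]
--     return 1 if sub == transpose else 0
-- ===== Notes on version B (the rewrite author's own statement) =====
-- stated objective: idiomatic
-- what changed: Replaced the count-matching-pairs-then-compare-to-dimension*(dimension-1) double loop by building the transpose of the dimension x dimension submatrix and comparing it to the submatrix for equality.
-- outside the precondition, e.g. on symmetry_main_diagonal([], -1): A returns 0, B returns 1
import Mathlib
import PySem

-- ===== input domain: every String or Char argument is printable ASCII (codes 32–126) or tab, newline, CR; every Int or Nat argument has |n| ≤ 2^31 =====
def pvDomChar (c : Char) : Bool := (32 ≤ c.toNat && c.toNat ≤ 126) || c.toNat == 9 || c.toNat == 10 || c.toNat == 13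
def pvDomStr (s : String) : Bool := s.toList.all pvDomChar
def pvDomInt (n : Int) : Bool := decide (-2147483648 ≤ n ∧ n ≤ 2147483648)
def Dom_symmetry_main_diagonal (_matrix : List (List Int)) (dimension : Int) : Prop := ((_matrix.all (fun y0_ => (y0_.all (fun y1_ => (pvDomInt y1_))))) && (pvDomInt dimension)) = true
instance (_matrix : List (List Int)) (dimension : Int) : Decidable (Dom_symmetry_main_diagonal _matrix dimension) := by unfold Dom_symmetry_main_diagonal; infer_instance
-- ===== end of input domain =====

-- B builds the transpose of the dimension×dimension submatrix and compares it to the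
-- submatrix, instead of counting matching off-diagonal pairs and testing the count (idiomatic).


-- ===== PORT A =====
def symmetry_main_diagonal (_matrix : List (List Int)) (dimension : Int) : Int :=
  let symmetry : Int :=
    (PySem.List.pyRange 0 dimension 1).foldl (fun s i =>
      (PySem.List.pyRange 0 dimension 1).foldl (fun s j =>
        if PySem.List.pyGetD (PySem.List.pyGetD _matrix i []) j 0 =
             PySem.List.pyGetD (PySem.List.pyGetD _matrix j []) i 0 ∧ j ≠ i
        then s + 1 else s) s) 0
  if symmetry = dimension * (dimension - 1) then 1 else 0

-- ===== PORT B =====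
def symmetry_main_diagonal_alt (_matrix : List (List Int)) (dimension : Int) : Int :=
  let sub := (PySem.List.slice _matrix none (some dimension)).map
               (fun row => PySem.List.slice row none (some dimension))
  let transpose := (PySem.List.pyRange 0 dimension 1).map (fun i =>
      (PySem.List.pyRange 0 dimension 1).map (fun j =>
        PySem.List.pyGetD (PySem.List.pyGetD _matrix j []) i 0))
  if sub = transpose then 1 else 0

-- ===== PRECONDITION & SPEC =====
-- Pre_ restricts to the natural domain 0 ≤ dimension ≤ number of rows with the first
-- `dimension` rows at least `dimension` long: outside it A either raises IndexError
-- (dimension too large / a row too short) or, for negative dimension — a meaningless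
-- input where A's 0 (count test against a positive product) and B's slice-based value
-- are both accidental — the two are not claimed to agree.
def Pre_symmetry_main_diagonal (_matrix : List (List Int)) (dimension : Int) : Prop :=
  0 ≤ dimension ∧ dimension.toNat ≤ _matrix.length ∧
    ∀ row ∈ _matrix.take dimension.toNat, dimension.toNat ≤ row.length
instance (_matrix : List (List Int)) (dimension : Int) : Decidable (Pre_symmetry_main_diagonal _matrix dimension) := by unfold Pre_symmetry_main_diagonal; infer_instance

def pvWitness_symmetry_main_diagonal : List (List Int) × Int := ([[1, 2], [2, 3]], 2)

def Spec_symmetry_main_diagonal (_matrix : List (List Int)) (dimension : Int) (out : Int) : Prop := out = symmetry_main_diagonal_alt _matrix dimension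
instance (_matrix : List (List Int)) (dimension : Int) (out : Int) : Decidable (Spec_symmetry_main_diagonal _matrix dimension out) := by unfold Spec_symmetry_main_diagonal; infer_instance

-- ===== CLAIM (what is proved, stated in full; the proofs are below) =====
def Claim_equal_symmetry_main_diagonal : Prop := ∀ (_matrix : List (List Int)) (dimension : Int), Dom_symmetry_main_diagonal _matrix dimension → Pre_symmetry_main_diagonal _matrix dimension → Spec_symmetry_main_diagonal _matrix dimension (symmetry_main_diagonal _matrix dimension)

-- ===== LEMMAS AND PROOFS =====

def pvGet (m : List (List Int)) (i j : Nat) : Int := (m.getD i []).getD j 0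

def pvSym (m : List (List Int)) (n : Nat) : Prop := ∀ i < n, ∀ j < n, pvGet m i j = pvGet m j i

-- outer loop is a sum
theorem pv_foldl_sum (f : Nat → Int) (l : List Nat) (s : Int) :
    l.foldl (fun s i => s + f i) s = s + (l.map f).sum := by
  induction l generalizing s with
  | nil => simp
  | cons a t ih => simp [ih]; ring

theorem pv_two_le_length {l : List Nat} {a b : Nat} (ha : a ∈ l) (hb : b ∈ l) (hne : a ≠ b) :
    2 ≤ l.length := by
  obtain ⟨l1, l2, rfl⟩ := List.append_of_mem ha
  rcases List.mem_append.1 hb with h | h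
  · have := List.length_pos_of_mem h
    simp [List.length_append]; omega
  · rcases List.mem_cons.1 h with h | h
    · exact absurd h.symm hne
    · have := List.length_pos_of_mem h
      simp [List.length_append]; omega

-- countP (j ≠ i) over range n, i < n
theorem pv_countP_ne (n i : Nat) (hi : i < n) :
    (List.range n).countP (fun j => decide (j ≠ i)) = n - 1 := by
  have h := List.length_eq_countP_add_countP (l := List.range n) (fun j => decide (j ≠ i))
  have h2 : (List.range n).countP (fun a => decide ¬(decide (a ≠ i) = true)) =
      (List.range n).count i := by
    rw [List.count]
    apply List.countP_congr
    intro x hx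
    simp
  rw [h2, List.count_eq_one_of_mem (List.nodup_range) (List.mem_range.mpr hi),
    List.length_range] at h
  omega

theorem pv_sum_le (f : Nat → Nat) (B : Nat) (l : List Nat) (h : ∀ x ∈ l, f x ≤ B) :
    (l.map f).sum ≤ B * l.length := by
  induction l with
  | nil => simp
  | cons a t ih =>
    simp only [List.map_cons, List.sum_cons, List.length_cons, Nat.mul_succ]
    have := h a (by simp)
    have := ih (fun x hx => h x (List.mem_cons_of_mem _ hx))
    omega

theorem pv_sum_lt (f : Nat → Nat) (B : Nat) (l : List Nat) (h : ∀ x ∈ l, f x ≤ B)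
    {x0 : Nat} (hx0 : x0 ∈ l) (hlt : f x0 < B) :
    (l.map f).sum < B * l.length := by
  induction l with
  | nil => simp at hx0
  | cons a t ih =>
    simp only [List.map_cons, List.sum_cons, List.length_cons, Nat.mul_succ]
    have ha := h a (by simp)
    have hle := pv_sum_le f B t (fun x hx => h x (List.mem_cons_of_mem _ hx))
    rcases List.mem_cons.1 hx0 with rfl | hmem
    · omega
    · have := ih (fun x hx => h x (List.mem_cons_of_mem _ hx)) hmem
      omega

def pvC (m : List (List Int)) (n i : Nat) : Nat :=
  (List.range n).countP (fun j => decide (pvGet m i j = pvGet m j i ∧ j ≠ i))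

theorem pv_foldl_count' (p : Nat → Prop) [DecidablePred p] (l : List Nat) (s : Int) :
    l.foldl (fun s j => if p j then s + 1 else s) s = s + (l.countP (fun j => decide (p j)) : Int) := by
  induction l generalizing s with
  | nil => simp
  | cons a t ih => by_cases h : p a <;> simp [h, ih, List.countP_cons] <;> push_cast <;> ring

theorem pv_cast_prod (n : Nat) : ((n * (n - 1) : Nat) : Int) = ↑n * (↑n - 1) := by
  cases n with
  | zero => simp
  | succ k => push_cast [Nat.succ_sub_one]; ring

theorem pv_A_loop (m : List (List Int)) (n : Nat) :
    (PySem.List.pyRange 0 (↑n) 1).foldl (fun s i =>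
      (PySem.List.pyRange 0 (↑n) 1).foldl (fun s j =>
        if PySem.List.pyGetD (PySem.List.pyGetD m i []) j 0 =
             PySem.List.pyGetD (PySem.List.pyGetD m j []) i 0 ∧ j ≠ i
        then s + 1 else s) s) 0
    = ((((List.range n).map (fun i => pvC m n i)).sum : Nat) : Int) := by
  rw [PySem.List.pyRange_zero_natCast]
  simp only [List.foldl_map]
  have hinner : ∀ (i : Nat) (s : Int),
      (List.range n).foldl (fun (s : Int) (j : Nat) =>
        if PySem.List.pyGetD (PySem.List.pyGetD m (↑i) []) (↑j) 0 =
             PySem.List.pyGetD (PySem.List.pyGetD m (↑j) []) (↑i) 0 ∧ (↑j : Int) ≠ (↑i)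
        then s + 1 else s) s = s + (pvC m n i : Int) := by
    intro i s
    rw [pv_foldl_count' (fun j => PySem.List.pyGetD (PySem.List.pyGetD m (↑i) []) (↑j) 0 =
          PySem.List.pyGetD (PySem.List.pyGetD m (↑j) []) (↑i) 0 ∧ (↑j : Int) ≠ (↑i))]
    have : (List.range n).countP (fun (j : Nat) => decide (PySem.List.pyGetD (PySem.List.pyGetD m (↑i) []) (↑j) 0 =
          PySem.List.pyGetD (PySem.List.pyGetD m (↑j) []) (↑i) 0 ∧ (↑j : Int) ≠ (↑i))) = pvC m n i := by
      apply List.countP_congr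
      intro x hx
      simp [PySem.List.pyGetD_natCast, pvGet, Ne]
    rw [this]
  simp only [hinner]
  rw [pv_foldl_sum]
  simp [Nat.cast_list_sum, List.map_map, Function.comp_def]

theorem pv_c_le (m : List (List Int)) (n i : Nat) (hi : i < n) : pvC m n i ≤ n - 1 := by
  calc pvC m n i ≤ (List.range n).countP (fun j => decide (j ≠ i)) := by
        apply List.countP_mono_left
        intro x _ hx
        simp only [decide_eq_true_eq] at hx ⊢
        exact hx.2
    _ = n - 1 := pv_countP_ne n i hi

theorem pv_A_one (m : List (List Int)) (n : Nat) (h : pvSym m n) :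
    symmetry_main_diagonal m (↑n) = 1 := by
  unfold symmetry_main_diagonal
  rw [pv_A_loop]
  have hc : ∀ i ∈ List.range n, pvC m n i = n - 1 := by
    intro i hi
    rw [List.mem_range] at hi
    have : pvC m n i = (List.range n).countP (fun j => decide (j ≠ i)) := by
      apply List.countP_congr
      intro x hx
      rw [List.mem_range] at hx
      simp [h i hi x hx]
    rw [this, pv_countP_ne n i hi]
  have hmap : (List.range n).map (fun i => pvC m n i) = (List.range n).map (fun _ => n - 1) :=
    List.map_congr_left hc
  rw [hmap]
  have hsum : ((List.range n).map (fun _ => n - 1)).sum = n * (n - 1) := by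
    simp [List.map_const', List.sum_replicate, smul_eq_mul, Nat.mul_comm]
  rw [hsum, pv_cast_prod]
  simp

theorem pv_A_zero (m : List (List Int)) (n : Nat) (h : ¬ pvSym m n) :
    symmetry_main_diagonal m (↑n) = 0 := by
  unfold symmetry_main_diagonal
  rw [pv_A_loop]
  -- extract a bad pair
  unfold pvSym at h
  push_neg at h
  obtain ⟨i0, hi0, j0, hj0, hbad⟩ := h
  have hne : i0 ≠ j0 := by rintro rfl; exact hbad rfl
  have hn2 : 2 ≤ n := by omega
  -- c i0 ≤ n - 2
  have hc0 : pvC m n i0 ≤ n - 2 := by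
    have step1 : pvC m n i0 ≤ (List.range n).countP (fun j => decide (j ≠ i0 ∧ j ≠ j0)) := by
      apply List.countP_mono_left
      intro x hx hpx
      simp only [pvC, decide_eq_true_eq] at hpx
      apply decide_eq_true
      refine ⟨hpx.2, ?_⟩
      rintro rfl
      exact hbad hpx.1
    have step2 : (List.range n).countP (fun j => decide (j ≠ i0 ∧ j ≠ j0)) ≤ n - 2 := by
      have hlen := List.length_eq_countP_add_countP (l := List.range n)
        (fun j => decide (j ≠ i0 ∧ j ≠ j0))
      rw [List.length_range] at hlen
      beta_reduce at hlen
      have h2le : 2 ≤ (List.range n).countP (fun a => decide ¬(decide (a ≠ i0 ∧ a ≠ j0) = true)) := by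
        rw [List.countP_eq_length_filter]
        apply pv_two_le_length (a := i0) (b := j0) _ _ hne
        · simp [List.mem_filter, List.mem_range]; omega
        · simp [List.mem_filter, List.mem_range]; omega
      omega
    omega
  have hbound : ∀ x ∈ List.range n, pvC m n x ≤ n - 1 := fun x hx =>
    pv_c_le m n x (List.mem_range.mp hx)
  have hlt : ((List.range n).map (fun i => pvC m n i)).sum < (n - 1) * (List.range n).length :=
    pv_sum_lt _ _ _ hbound (List.mem_range.mpr hi0) (by omega)
  rw [List.length_range, Nat.mul_comm] at hlt
  have hne' : (((List.range n).map (fun i => pvC m n i)).sum : Int) ≠ ↑n * (↑n - 1) := by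
    rw [← pv_cast_prod]
    intro hcast
    have := Int.ofNat_inj.mp hcast
    omega
  exact if_neg hne'

theorem pvGet_eq (m : List (List Int)) (i j : Nat) (hi : i < m.length)
    (hj : j < (m[i]'hi).length) : pvGet m i j = (m[i]'hi)[j]'hj := by
  unfold pvGet
  rw [List.getD_eq_getElem _ _ hi, List.getD_eq_getElem _ _ hj]

theorem pv_rowlen (m : List (List Int)) (n : Nat) (hlen : n ≤ m.length)
    (hrow : ∀ row ∈ m.take n, n ≤ row.length) (i : Nat) (hi : i < n) :
    n ≤ (m[i]'(by omega)).length := by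
  have h1 : i < (m.take n).length := by simp [List.length_take]; omega
  have h2 : (m.take n)[i]'h1 = m[i]'(by omega) := List.getElem_take
  have := hrow ((m.take n)[i]'h1) (List.getElem_mem h1)
  rwa [h2] at this

theorem pv_B_iff (m : List (List Int)) (n : Nat) (hlen : n ≤ m.length)
    (hrow : ∀ row ∈ m.take n, n ≤ row.length) :
    ((m.take n).map (fun r => r.take n) =
      (List.range n).map (fun i => (List.range n).map (fun j => pvGet m j i)))
    ↔ pvSym m n := by
  have hL : ((m.take n).map (fun r => r.take n)).length = n := by
    simp [List.length_take]; omega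
  constructor
  · intro h i hi j hj
    have hiL : i < ((m.take n).map (fun r => r.take n)).length := by omega
    have h1 := List.getElem_of_eq h hiL
    simp only [List.getElem_map, List.getElem_take, List.getElem_range] at h1
    -- h1 : (m[i]).take n = (List.range n).map (fun j => pvGet m j i)
    have hjlen : j < ((m[i]'(by omega)).take n).length := by
      simp [List.length_take]
      exact ⟨hj, by have := pv_rowlen m n hlen hrow i hi; omega⟩
    have h2 := List.getElem_of_eq h1 hjlen
    simp only [List.getElem_take, List.getElem_map, List.getElem_range] at h2
    rw [pvGet_eq m i j (by omega) (by have := pv_rowlen m n hlen hrow i hi; omega)]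
    exact h2
  · intro h
    apply List.ext_getElem
    · simp [List.length_take]; omega
    · intro i hi1 hi2
      simp only [List.getElem_map, List.getElem_take, List.getElem_range]
      apply List.ext_getElem
      · simp [List.length_take]
        have := pv_rowlen m n hlen hrow i (by omega)
        omega
      · intro j hj1 hj2
        simp only [List.getElem_take, List.getElem_map, List.getElem_range]
        have hi : i < n := by omega
        have hj : j < n := by
          simp [List.length_take] at hj1
          omega
        rw [← pvGet_eq m i j (by omega) (by have := pv_rowlen m n hlen hrow i hi; omega)]
        exact h i hi j hj

theorem pv_B_val (m : List (List Int)) (n : Nat) :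
    symmetry_main_diagonal_alt m (↑n) =
      if ((m.take n).map (fun r => r.take n) =
          (List.range n).map (fun i => (List.range n).map (fun j => pvGet m j i)))
      then 1 else 0 := by
  unfold symmetry_main_diagonal_alt
  simp only [PySem.List.slice_to_natCast, PySem.List.pyRange_zero_natCast,
    List.map_map, Function.comp_def, PySem.List.pyGetD_natCast]
  rfl

theorem symmetry_main_diagonal_spec : Claim_equal_symmetry_main_diagonal := by
  intro m d _ hpre
  obtain ⟨h0, hlen, hrow⟩ := hpre
  unfold Spec_symmetry_main_diagonal
  have hd : d = ((d.toNat : Nat) : Int) := by omega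
  rw [hd]
  by_cases h : pvSym m d.toNat
  · rw [pv_A_one _ _ h, pv_B_val, if_pos ((pv_B_iff m d.toNat hlen hrow).mpr h)]
  · rw [pv_A_zero _ _ h, pv_B_val, if_neg (fun hc => h ((pv_B_iff m d.toNat hlen hrow).mp hc))]
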